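-- pv_equiv track=rewrite | github.com/bgmartins/unsupervised-keyphrase-extraction | swisscom_ai/research_keyphrase/embeddings/emb_distrib_local.py | seq_in_seq
-- ===== SOURCE A (Python) =====
-- def seq_in_seq(subseq, seq):
--     p = 0
--     l = [ ]
--     seq = list(seq)
--     subseq = list(subseq)
--     while subseq[0] in seq:
--         index = seq.index(subseq[0])
--         if subseq == seq[index:index + len(subseq)]:
--             l.append(index + p)
--             seq = seq[index + len(subseq):]
--             p = p + index + len(subseq)
--         else:
--             seq = seq[index + 1:]
--             p = p + index + 1
--     else: return l
-- ===== SOURCE B (Python) =====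
-- def seq_in_seq(subseq, seq):
--     seq = list(seq)
--     subseq = list(subseq)
--     m = len(subseq)
--     n = len(seq)
--     l = []
--     i = 0
--     while i + m <= n:
--         if seq[i:i + m] == subseq:
--             l.append(i)
--             i += m
--         else:
--             i += 1
--     return l
-- ===== Notes on version B (the rewrite author's own statement) =====
-- stated objective: alternative
-- what changed: A repeatedly searches for the first element with list.index and rebuilds the remaining list by slicing on every step while tracking an offset p; B is a single sliding-window index loop over the untouched list, advancing i by 1 on mismatch and by len(subseq) past each match, so no list is ever copied or re-searched.
import Mathlib
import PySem

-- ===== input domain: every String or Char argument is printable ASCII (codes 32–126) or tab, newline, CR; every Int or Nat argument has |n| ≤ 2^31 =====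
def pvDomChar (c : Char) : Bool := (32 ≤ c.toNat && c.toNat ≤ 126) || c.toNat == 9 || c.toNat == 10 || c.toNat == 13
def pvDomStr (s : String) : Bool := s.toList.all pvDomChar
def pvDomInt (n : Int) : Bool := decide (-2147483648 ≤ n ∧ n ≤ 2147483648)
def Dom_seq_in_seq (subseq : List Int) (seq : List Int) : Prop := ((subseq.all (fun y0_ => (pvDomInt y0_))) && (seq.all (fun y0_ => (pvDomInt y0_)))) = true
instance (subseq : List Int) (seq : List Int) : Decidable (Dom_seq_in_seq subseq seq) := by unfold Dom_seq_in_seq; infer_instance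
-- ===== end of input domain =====

-- B replaces A's repeated list.index search + tail-slicing (which copies the remaining
-- list on every step) by a single sliding-window index loop over the untouched list.

-- ===== PORT A =====
-- A's while loop: subseq is nonempty here (guaranteed by Pre_); seq shrinks every step.
-- 'subseq[0] in seq' + 'seq.index(subseq[0])' are ported together via PySem.List.index?
-- (some ↔ membership, value = first index, exactly Python's .index).
def seqInSeqALoop (s0 : Int) (tl : List Int) (p : Int) (l : List Int) (seq : List Int) :
    List Int :=
  match h : PySem.List.index? seq s0 with
  | none => l
  | some index =>
      -- len(subseq) = tl.length + 1
      if (s0 :: tl) = PySem.List.slice seq (some (index : Int))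
          (some ((index : Int) + ((tl.length : Int) + 1))) then
        seqInSeqALoop s0 tl (p + index + (tl.length + 1)) (l ++ [(index : Int) + p])
          (PySem.List.slice seq (some ((index : Int) + ((tl.length : Int) + 1))) none)
      else
        seqInSeqALoop s0 tl (p + index + 1) l
          (PySem.List.slice seq (some ((index : Int) + 1)) none)
termination_by seq.length
decreasing_by
  · obtain ⟨hk, -, -⟩ := PySem.List.getElem_of_index?_eq_some h
    have : (index : Int) + ((tl.length : Int) + 1) = ((index + (tl.length + 1) : Nat) : Int) := by
      push_cast; ring
    rw [this, PySem.List.slice_from_natCast, List.length_drop]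
    omega
  · obtain ⟨hk, -, -⟩ := PySem.List.getElem_of_index?_eq_some h
    have : (index : Int) + 1 = ((index + 1 : Nat) : Int) := by push_cast; ring
    rw [this, PySem.List.slice_from_natCast, List.length_drop]
    omega

def seq_in_seq (subseq : List Int) (seq : List Int) : List Int :=
  match subseq with
  | [] => []          -- Python raises IndexError on subseq[0]; excluded by Pre_
  | s0 :: tl => seqInSeqALoop s0 tl 0 [] seq

-- ===== PORT B =====
-- B's while loop: i only increases from 0, so it is a Nat here; m = len(subseq) ≥ 1.
def seqInSeqBLoop (s0 : Int) (tl : List Int) (seq : List Int) (i : Nat) (l : List Int) :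
    List Int :=
  let m := tl.length + 1
  if i + m ≤ seq.length then
    if PySem.List.slice seq (some (i : Int)) (some ((i : Int) + (m : Int))) = s0 :: tl then
      seqInSeqBLoop s0 tl seq (i + m) (l ++ [(i : Int)])
    else
      seqInSeqBLoop s0 tl seq (i + 1) l
  else l
termination_by seq.length - i

def seq_in_seq_alt (subseq : List Int) (seq : List Int) : List Int :=
  match subseq with
  | [] => []          -- Python B never terminates here; excluded by Pre_
  | s0 :: tl => seqInSeqBLoop s0 tl seq 0 []

-- ===== PRECONDITION & SPEC =====
-- Pre_ excludes only empty subseq, on which Python A raises IndexError (subseq[0]).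
def Pre_seq_in_seq (subseq : List Int) (seq : List Int) : Prop := subseq ≠ []
instance (subseq : List Int) (seq : List Int) : Decidable (Pre_seq_in_seq subseq seq) := by
  unfold Pre_seq_in_seq; infer_instance

def pvWitness_seq_in_seq : List Int × List Int := ([1, 2], [1, 1, 2, 1, 2, 3, 1, 2])

def Spec_seq_in_seq (subseq : List Int) (seq : List Int) (out : List Int) : Prop :=
  out = seq_in_seq_alt subseq seq
instance (subseq : List Int) (seq : List Int) (out : List Int) :
    Decidable (Spec_seq_in_seq subseq seq out) := by unfold Spec_seq_in_seq; infer_instance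

-- ===== CLAIM (what is proved, stated in full; the proofs are below) =====
def Claim_equal_seq_in_seq : Prop :=
  ∀ (subseq : List Int) (seq : List Int), Dom_seq_in_seq subseq seq →
    Pre_seq_in_seq subseq seq → Spec_seq_in_seq subseq seq (seq_in_seq subseq seq)

-- ===== LEMMAS AND PROOFS =====

-- normalise the slices in both ports to drop/take
theorem slice_window (seq : List Int) (i m : Nat) :
    PySem.List.slice seq (some (i : Int)) (some ((i : Int) + (m : Int))) =
      (seq.drop i).take m := by
  simpa using PySem.List.slice_natCast_add seq i m

theorem slice_window' (seq : List Int) (i : Nat) (tl : List Int) :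
    PySem.List.slice seq (some (i : Int)) (some ((i : Int) + ((tl.length : Int) + 1))) =
      (seq.drop i).take (tl.length + 1) := by
  have hc : ((tl.length : Int) + 1) = ((tl.length + 1 : Nat) : Int) := by push_cast; ring
  rw [hc]; exact slice_window seq i (tl.length + 1)

theorem slice_tail (seq : List Int) (i : Nat) :
    PySem.List.slice seq (some (i : Int)) none = seq.drop i :=
  PySem.List.slice_from_natCast seq i

-- guard-fail form of B's loop
theorem bLoop_short (s0 : Int) (tl seq : List Int) (i : Nat) (l : List Int)
    (h : ¬ i + (tl.length + 1) ≤ seq.length) :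
    seqInSeqBLoop s0 tl seq i l = l := by
  rw [seqInSeqBLoop]; simp [h]

-- s0 not in the remaining window ⇒ B finds nothing more
theorem bLoop_not_mem (s0 : Int) (tl seq : List Int) :
    ∀ (i : Nat) (l : List Int), s0 ∉ seq.drop i → seqInSeqBLoop s0 tl seq i l = l := by
  intro i
  induction' hk : seq.length - i using Nat.strong_induction_on with k ih generalizing i
  subst hk
  intro l hs0
  by_cases hg : i + (tl.length + 1) ≤ seq.length
  · obtain ⟨x, r, hxr⟩ := List.exists_cons_of_ne_nil (l := seq.drop i)
      (by intro h0; have := congrArg List.length h0; simp at this; omega)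
    have hxne : x ≠ s0 := by
      intro h; apply hs0; rw [hxr, h]; exact List.mem_cons_self
    rw [seqInSeqBLoop]
    simp only [hg, if_true]
    rw [slice_window, hxr, List.take_succ_cons]
    rw [if_neg (by intro he; exact hxne (by injection he))]
    have hdrop1 : seq.drop (i + 1) = r := by
      have ht : (seq.drop i).tail = r := by rw [hxr]; rfl
      rw [← List.tail_drop, ht]
    exact ih (seq.length - (i + 1)) (by omega) (i + 1) rfl l
      (by rw [hdrop1]; intro hm; exact hs0 (by rw [hxr]; exact List.mem_cons_of_mem _ hm))
  · exact bLoop_short s0 tl seq i l hg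

-- first occurrence of s0 at offset j in the remaining window ⇒ B skips j mismatching steps
theorem bLoop_skip (s0 : Int) (tl seq : List Int) :
    ∀ (j i : Nat) (l : List Int), PySem.List.index? (seq.drop i) s0 = some j →
      seqInSeqBLoop s0 tl seq i l = seqInSeqBLoop s0 tl seq (i + j) l := by
  intro j
  induction j with
  | zero => intro i l _; simp
  | succ j ih =>
    intro i l hidx
    obtain ⟨hk, hget, hbefore⟩ := PySem.List.getElem_of_index?_eq_some hidx
    have hi : i < seq.length := by
      have := hk; rw [List.length_drop] at this; omega
    obtain ⟨x, r, hxr⟩ := List.exists_cons_of_ne_nil (l := seq.drop i)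
      (by intro h0; rw [h0] at hk; simp at hk)
    have hxne : x ≠ s0 := by
      intro h
      have h0 : (seq.drop i)[0]'(by rw [List.length_drop]; omega) = x := by
        rw [List.getElem_of_eq hxr]; simp
      exact hbefore 0 (by omega) (h ▸ h0)
    have hdrop1 : seq.drop (i + 1) = r := by
      have ht : (seq.drop i).tail = r := by rw [hxr]; rfl
      rw [← List.tail_drop, ht]
    have hidx' : PySem.List.index? (seq.drop (i + 1)) s0 = some j := by
      rw [hxr, PySem.List.index?_cons_of_ne r hxne] at hidx
      cases hmap : PySem.List.index? r s0 with
      | none => rw [hmap] at hidx; simp at hidx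
      | some j' =>
        rw [hmap] at hidx; simp at hidx
        rw [hdrop1, hmap, hidx]
    by_cases hg : i + (tl.length + 1) ≤ seq.length
    · rw [seqInSeqBLoop]
      simp only [hg, if_true]
      rw [slice_window, hxr, List.take_succ_cons]
      rw [if_neg (by intro he; exact hxne (by injection he))]
      rw [ih (i + 1) l hidx']
      ring_nf
    · rw [bLoop_short s0 tl seq i l hg, bLoop_short s0 tl seq (i + (j + 1)) l (by omega)]

-- accumulator lemmas
theorem aLoop_acc (s0 : Int) (tl : List Int) :
    ∀ (seq : List Int) (p : Int) (l : List Int),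
      seqInSeqALoop s0 tl p l seq = l ++ seqInSeqALoop s0 tl p [] seq := by
  intro seq
  induction' hk : seq.length using Nat.strong_induction_on with k ih generalizing seq
  subst hk
  intro p l
  conv_lhs => rw [seqInSeqALoop]
  conv_rhs => rw [seqInSeqALoop]
  cases hidx : PySem.List.index? seq s0 with
  | none => simp
  | some index =>
    obtain ⟨hik, -, -⟩ := PySem.List.getElem_of_index?_eq_some hidx
    simp only [List.nil_append]
    have hrw1 : (index : Int) + ((tl.length : Int) + 1) = ((index + (tl.length + 1) : Nat) : Int) := by
      push_cast; ring
    split_ifs with h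
    · rw [hrw1, slice_tail]
      rw [ih (seq.drop (index + (tl.length + 1))).length
        (by rw [List.length_drop]; omega) _ rfl _ (l ++ [(index : Int) + p]),
        ih (seq.drop (index + (tl.length + 1))).length
        (by rw [List.length_drop]; omega) _ rfl _ ([(index : Int) + p])]
      simp
    · have hrw2 : (index : Int) + 1 = ((index + 1 : Nat) : Int) := by push_cast; ring
      rw [hrw2, slice_tail]
      exact ih (seq.drop (index + 1)).length (by rw [List.length_drop]; omega) _ rfl _ l

theorem bLoop_acc (s0 : Int) (tl seq : List Int) :
    ∀ (i : Nat) (l : List Int),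
      seqInSeqBLoop s0 tl seq i l = l ++ seqInSeqBLoop s0 tl seq i [] := by
  intro i
  induction' hk : seq.length - i using Nat.strong_induction_on with k ih generalizing i
  subst hk
  intro l
  conv_lhs => rw [seqInSeqBLoop]
  conv_rhs => rw [seqInSeqBLoop]
  by_cases hg : i + (tl.length + 1) ≤ seq.length
  · simp only [hg, if_true, List.nil_append]
    split_ifs with h
    · rw [ih (seq.length - (i + (tl.length + 1))) (by omega) _ rfl (l ++ [(i : Int)]),
        ih (seq.length - (i + (tl.length + 1))) (by omega) _ rfl ([(i : Int)])]
      simp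
    · exact ih (seq.length - (i + 1)) (by omega) _ rfl l
  · simp [hg]

-- main bridge: A's loop on the suffix seq.drop i with offset p = i equals B's loop at index i
theorem main_bridge (s0 : Int) (tl seq : List Int) :
    ∀ (i : Nat), seqInSeqALoop s0 tl (i : Int) [] (seq.drop i) =
      seqInSeqBLoop s0 tl seq i [] := by
  intro i
  induction' hk : seq.length - i using Nat.strong_induction_on with k ih generalizing i
  subst hk
  cases hidx : PySem.List.index? (seq.drop i) s0 with
  | none =>
    rw [seqInSeqALoop, hidx]
    exact (bLoop_not_mem s0 tl seq i []
      ((PySem.List.index?_eq_none_iff _ _).mp hidx)).symm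
  | some j =>
    obtain ⟨hjk, hget, hbefore⟩ := PySem.List.getElem_of_index?_eq_some hidx
    have hjlen : i + j < seq.length := by rw [List.length_drop] at hjk; omega
    rw [bLoop_skip s0 tl seq j i [] hidx]
    rw [seqInSeqALoop, hidx]
    simp only
    have hdrop : (seq.drop i).drop j = seq.drop (i + j) := by
      rw [List.drop_drop]
    have hwinA : PySem.List.slice (seq.drop i) (some (j : Int))
        (some ((j : Int) + ((tl.length : Int) + 1))) =
        (seq.drop (i + j)).take (tl.length + 1) := by
      rw [slice_window', hdrop]
    by_cases hmatch : (s0 :: tl) = (seq.drop (i + j)).take (tl.length + 1)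
    · -- match at i + j
      have hglen : i + j + (tl.length + 1) ≤ seq.length := by
        have := congrArg List.length hmatch
        simp only [List.length_cons, List.length_take, List.length_drop] at this
        omega
      simp only [hwinA, hmatch, if_true]
      -- A side
      have hrw1 : (j : Int) + ((tl.length : Int) + 1) = ((j + (tl.length + 1) : Nat) : Int) := by
        push_cast; ring
      rw [hrw1, slice_tail, List.drop_drop]
      rw [aLoop_acc]
      have hpA : (i : Int) + (j : Int) + ((tl.length : Int) + 1) =
          (((i + j + (tl.length + 1) : Nat)) : Int) := by push_cast; ring
      have hdropA : i + (j + (tl.length + 1)) = i + j + (tl.length + 1) := by ring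
      rw [hdropA, hpA]
      rw [ih (seq.length - (i + j + (tl.length + 1))) (by omega) _ rfl]
      -- B side
      conv_rhs => rw [seqInSeqBLoop]
      simp only [hglen, if_true, slice_window]
      rw [if_pos hmatch.symm, bLoop_acc s0 tl seq (i + j + (tl.length + 1))]
      have hval : (j : Int) + (i : Int) = ((i + j : Nat) : Int) := by push_cast; ring
      simp only [hval, List.nil_append, List.singleton_append]
      conv_rhs => rw [bLoop_acc s0 tl seq (i + j + (tl.length + 1))]
      simp
    · -- mismatch at i + j
      simp only [hwinA, hmatch, if_false]
      have hrw2 : (j : Int) + 1 = ((j + 1 : Nat) : Int) := by push_cast; ring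
      rw [hrw2, slice_tail, List.drop_drop]
      have hpA : (i : Int) + (j : Int) + 1 = (((i + j + 1 : Nat)) : Int) := by push_cast; ring
      have hdropA : i + (j + 1) = i + j + 1 := by ring
      rw [hdropA, hpA, ih (seq.length - (i + j + 1)) (by omega) _ rfl]
      by_cases hg : i + j + (tl.length + 1) ≤ seq.length
      · conv_rhs => rw [seqInSeqBLoop]
        simp only [hg, if_true, slice_window]
        rw [if_neg (fun he => hmatch he.symm)]
      · rw [bLoop_short s0 tl seq (i + j) [] (by omega),
          bLoop_short s0 tl seq (i + j + 1) [] (by omega)]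

-- ===== VERDICT (by name: the statement is the Claim_ definition above) =====
theorem seq_in_seq_spec : Claim_equal_seq_in_seq := by
  intro subseq seq _ hpre
  unfold Spec_seq_in_seq
  match subseq with
  | [] => exact absurd rfl hpre
  | s0 :: tl =>
    show seqInSeqALoop s0 tl 0 [] seq = seqInSeqBLoop s0 tl seq 0 []
    have := main_bridge s0 tl seq 0
    simpa using this
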